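-- pv_equiv track=rewrite | github.com/AfoninSV/python_scripts | reverse_words_in_text.py | strings_join
-- ===== SOURCE A (Python) =====
-- def strings_join(pure_str, raw_str):
--     '''joining raw text with reversed words'''
--     joined = ''
--     counter = 0
--     for i_sym in range(len(raw_str)):
--         if raw_str[i_sym].isalpha():
--             joined += pure_str[counter]
--             counter += 1
--         else:
--             joined += raw_str[i_sym]
--
--     return joined
-- ===== SOURCE B (Python) =====
-- def strings_join(pure_str, raw_str):
--     '''joining raw text with reversed words'''
--     parts = []
--     k = 0
--     i = 0
--     n = len(raw_str)
--     while i < n: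
--         alpha = raw_str[i].isalpha()
--         j = i
--         while j < n and raw_str[j].isalpha() == alpha:
--             j += 1
--         if alpha:
--             parts.append(pure_str[k:k + (j - i)])
--             k += j - i
--         else:
--             parts.append(raw_str[i:j])
--         i = j
--     return ''.join(parts)
-- ===== Notes on version B (the rewrite author's own statement) =====
-- stated objective: alternative
-- what changed: B splits raw_str into maximal alphabetic/non-alphabetic runs and copies whole segments at once (a slice of pure_str for an alpha run, the raw run otherwise), joining the segment list at the end, instead of A's per-character scan with a running counter and string concatenation.
import Mathlib
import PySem

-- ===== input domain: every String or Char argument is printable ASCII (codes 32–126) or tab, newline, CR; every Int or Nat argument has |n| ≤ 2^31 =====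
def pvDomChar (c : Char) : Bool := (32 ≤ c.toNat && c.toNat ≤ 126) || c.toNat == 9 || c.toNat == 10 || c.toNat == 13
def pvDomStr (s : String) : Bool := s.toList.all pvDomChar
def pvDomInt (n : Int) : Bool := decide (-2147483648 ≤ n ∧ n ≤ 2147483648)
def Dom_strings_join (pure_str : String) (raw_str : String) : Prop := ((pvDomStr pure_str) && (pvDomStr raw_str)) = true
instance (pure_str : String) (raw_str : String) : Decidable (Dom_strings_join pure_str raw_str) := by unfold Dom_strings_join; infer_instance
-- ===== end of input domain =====

-- B splits raw_str into maximal alpha/non-alpha runs and copies whole segments (a slice of pure_str per alpha run) instead of A's per-character counter scan; objective: alternative decomposition, same cost.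

-- ===== PORT A =====
def strings_join (pure_str : String) (raw_str : String) : String :=
  let pureL := pure_str.toList
  let rawL := raw_str.toList
  let st := (PySem.List.pyRange 0 ((rawL.length : Int)) 1).foldl
    (fun (acc : List Char × Int) i =>
      if PySem.Chars.isalpha (PySem.List.pyGetD rawL i ' ') then
        (acc.1 ++ [PySem.List.pyGetD pureL acc.2 ' '], acc.2 + 1)
      else
        (acc.1 ++ [PySem.List.pyGetD rawL i ' '], acc.2)) ([], 0)
  String.mk st.1

-- ===== PORT B =====
-- the outer while loop of Source B: rs is raw_str[i:]; the inner while (finding the run end j)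
-- is the takeWhile/dropWhile pair on the same predicate raw_str[j].isalpha() == alpha
def bLoop (ps : List Char) (k : Int) (rs : List Char) : List (List Char) :=
  match rs with
  | [] => []
  | c :: rest =>
    let a := PySem.Chars.isalpha c
    let run := c :: rest.takeWhile (fun d => PySem.Chars.isalpha d == a)
    let rs' := rest.dropWhile (fun d => PySem.Chars.isalpha d == a)
    if a then
      PySem.List.slice ps (some k) (some (k + (run.length : Int))) :: bLoop ps (k + (run.length : Int)) rs'
    else
      run :: bLoop ps k rs'
  termination_by rs.length
  decreasing_by
    all_goals
      simp only [List.length_cons]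
      exact Nat.lt_succ_of_le (List.length_dropWhile_le _ _)
  
def strings_join_alt (pure_str : String) (raw_str : String) : String :=
  String.mk (bLoop pure_str.toList 0 raw_str.toList).flatten

-- ===== PRECONDITION & SPEC =====
-- Pre_ excludes exactly the inputs where Python A raises IndexError: pure_str shorter than the number of alphabetic chars of raw_str.
def Pre_strings_join (pure_str : String) (raw_str : String) : Prop :=
  (raw_str.toList.filter (fun c => PySem.Chars.isalpha c)).length ≤ pure_str.toList.length
instance (pure_str : String) (raw_str : String) : Decidable (Pre_strings_join pure_str raw_str) := by unfold Pre_strings_join; infer_instance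
def pvWitness_strings_join : String × String := ("olleh", "he ll,o!")

def Spec_strings_join (pure_str : String) (raw_str : String) (out : String) : Prop := out = strings_join_alt pure_str raw_str
instance (pure_str : String) (raw_str : String) (out : String) : Decidable (Spec_strings_join pure_str raw_str out) := by unfold Spec_strings_join; infer_instance

-- ===== CLAIM (what is proved, stated in full; the proofs are below) =====
def Claim_equal_strings_join : Prop := ∀ (pure_str : String) (raw_str : String), Dom_strings_join pure_str raw_str → Pre_strings_join pure_str raw_str → Spec_strings_join pure_str raw_str (strings_join pure_str raw_str)

-- ===== LEMMAS AND PROOFS =====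

-- common specification: interleave ps into the alpha positions, counter k
def specAux (ps : List Char) : Nat → List Char → List Char
  | _, [] => []
  | k, c :: rs =>
    if PySem.Chars.isalpha c then ps.getD k ' ' :: specAux ps (k+1) rs
    else c :: specAux ps k rs

theorem strings_join_A_fold (ps : List Char) (rs : List Char) :
    ∀ (k : Nat) (acc : List Char),
      rs.foldl (fun (acc : List Char × Int) c =>
        if PySem.Chars.isalpha c then
          (acc.1 ++ [PySem.List.pyGetD ps acc.2 ' '], acc.2 + 1)
        else (acc.1 ++ [c], acc.2)) (acc, (k : Int)) =
      (acc ++ specAux ps k rs, (k : Int) + (rs.filter (fun c => PySem.Chars.isalpha c)).length) := by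
  induction rs with
  | nil => intro k acc; simp [specAux]
  | cons c rs ih =>
    intro k acc
    by_cases h : PySem.Chars.isalpha c
    · rw [List.foldl_cons]
      simp only [h, if_pos]
      rw [show ((k : Int) + 1) = ((k + 1 : Nat) : Int) by push_cast; ring, ih (k+1)]
      simp [specAux, h]
      ring
    · simp [List.foldl_cons, h, ih k, specAux]

theorem specAux_append (ps : List Char) (xs ys : List Char) :
    ∀ k, specAux ps k (xs ++ ys) =
      specAux ps k xs ++ specAux ps (k + (xs.filter (fun c => PySem.Chars.isalpha c)).length) ys := by
  induction xs with
  | nil => intro k; simp [specAux]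
  | cons c xs ih =>
    intro k
    by_cases h : PySem.Chars.isalpha c
    · simp [specAux, h, ih, Nat.add_comm, Nat.add_left_comm]
    · simp [specAux, h, ih]

theorem specAux_all_alpha (ps : List Char) (xs : List Char)
    (hall : ∀ c ∈ xs, PySem.Chars.isalpha c = true) :
    ∀ k, k + xs.length ≤ ps.length → specAux ps k xs = (ps.drop k).take xs.length := by
  induction xs with
  | nil => intro k _; simp [specAux]
  | cons c xs ih =>
    intro k hk
    have hc : PySem.Chars.isalpha c = true := hall c (by simp)
    have hklt : k < ps.length := by simp at hk; omega
    rw [List.drop_eq_getElem_cons hklt]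
    simp only [specAux, hc, if_pos, List.length_cons, List.take_succ_cons]
    rw [ih (fun d hd => hall d (by simp [hd])) (k+1) (by simp at hk ⊢; omega)]
    congr 1
    exact List.getD_eq_getElem ps ' ' hklt

theorem specAux_no_alpha (ps : List Char) (xs : List Char)
    (hall : ∀ c ∈ xs, PySem.Chars.isalpha c = false) :
    ∀ k, specAux ps k xs = xs := by
  induction xs with
  | nil => intro k; simp [specAux]
  | cons c xs ih =>
    intro k
    have hc := hall c (by simp)
    simp [specAux, hc, ih (fun d hd => hall d (by simp [hd]))]

theorem bLoop_spec (ps : List Char) : ∀ (n : Nat) (rs : List Char), rs.length ≤ n →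
    ∀ (k : Nat), k + (rs.filter (fun c => PySem.Chars.isalpha c)).length ≤ ps.length →
      (bLoop ps (k : Int) rs).flatten = specAux ps k rs := by
  intro n
  induction n with
  | zero =>
    intro rs hlen k _
    have : rs = [] := List.eq_nil_of_length_eq_zero (Nat.le_zero.mp hlen)
    subst this; simp [bLoop, specAux]
  | succ n ih =>
    intro rs hlen k hk
    match rs with
    | [] => simp [bLoop, specAux]
    | c :: rest =>
      rw [bLoop]
      set a := PySem.Chars.isalpha c with ha
      set tw := rest.takeWhile (fun d => PySem.Chars.isalpha d == a) with htw
      set rs' := rest.dropWhile (fun d => PySem.Chars.isalpha d == a) with hrs'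
      have hsplit : c :: rest = (c :: tw) ++ rs' := by
        simp [htw, hrs', List.takeWhile_append_dropWhile]
      have hrs'len : rs'.length ≤ n := by
        rw [hrs']
        have := List.length_dropWhile_le (fun d => PySem.Chars.isalpha d == a) rest
        simp at hlen; omega
      have htwall : ∀ d ∈ tw, PySem.Chars.isalpha d = a := by
        intro d hd
        have := List.mem_takeWhile_imp (htw ▸ hd)
        simpa using this
      cases hcase : a with
      | true =>
        have hrun_all : ∀ d ∈ c :: tw, PySem.Chars.isalpha d = true := by
          intro d hd
          rcases List.mem_cons.mp hd with h | h
          · subst h; rw [← ha, hcase]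
          · rw [htwall d h, hcase]
        have hfilter_run : ((c :: tw).filter (fun c => PySem.Chars.isalpha c)).length = (c :: tw).length := by
          rw [List.filter_eq_self.mpr]
          intro d hd; simpa using hrun_all d hd
        have hcount : ((c :: rest).filter (fun c => PySem.Chars.isalpha c)).length
            = (c :: tw).length + (rs'.filter (fun c => PySem.Chars.isalpha c)).length := by
          rw [hsplit, List.filter_append, List.length_append, hfilter_run]
        rw [if_pos rfl]
        simp only [List.flatten_cons]
        rw [PySem.List.slice_natCast_add]
        have hcast : ((k : Int) + ((c :: tw).length : Int)) = ((k + (c :: tw).length : Nat) : Int) := by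
          push_cast; ring
        rw [hcast, ih rs' hrs'len (k + (c :: tw).length) (by omega)]
        rw [hsplit, specAux_append]
        congr 1
        · exact (specAux_all_alpha ps (c :: tw) hrun_all k (by omega)).symm
        · rw [hfilter_run]
      | false =>
        have hrun_no : ∀ d ∈ c :: tw, PySem.Chars.isalpha d = false := by
          intro d hd
          rcases List.mem_cons.mp hd with h | h
          · subst h; rw [← ha, hcase]
          · rw [htwall d h, hcase]
        have hfilter_run : ((c :: tw).filter (fun c => PySem.Chars.isalpha c)) = [] := by
          rw [List.filter_eq_nil_iff]
          intro d hd; simp [hrun_no d hd]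
        have hcount : ((c :: rest).filter (fun c => PySem.Chars.isalpha c)).length
            = (rs'.filter (fun c => PySem.Chars.isalpha c)).length := by
          rw [hsplit, List.filter_append, hfilter_run]; simp
        rw [if_neg (by simp)]
        simp only [List.flatten_cons]
        rw [ih rs' hrs'len k (by omega)]
        rw [hsplit, specAux_append, hfilter_run]
        simp only [List.length_nil, Nat.add_zero]
        congr 1
        exact (specAux_no_alpha ps (c :: tw) hrun_no k).symm

-- ===== VERDICT (by name: the statement is the Claim_ definition above) =====
theorem strings_join_spec : Claim_equal_strings_join := by
  intro pure_str raw_str _ hpre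
  unfold Spec_strings_join strings_join strings_join_alt
  dsimp only
  rw [PySem.List.foldl_pyRange_zero_pyGetD' raw_str.toList ' '
    (fun (acc : List Char × Int) c =>
      if PySem.Chars.isalpha c then
        (acc.1 ++ [PySem.List.pyGetD pure_str.toList acc.2 ' '], acc.2 + 1)
      else (acc.1 ++ [c], acc.2)) ([], 0)]
  have hA := strings_join_A_fold pure_str.toList raw_str.toList 0 []
  simp only [Nat.cast_zero] at hA
  rw [hA]
  have hB := bLoop_spec pure_str.toList raw_str.toList.length raw_str.toList le_rfl 0
    (by simpa using hpre)
  simp only [Nat.cast_zero] at hB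
  simp only [List.nil_append]
  rw [hB]
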